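-- pv_equiv track=rewrite | github.com/longlivedrgn/Algorhythm | 프로그래머스/2/42626. 더 맵게/더 맵게.py | solution
-- ===== SOURCE A (Python) =====
-- import heapq
--
-- def solution(scoville, K):
--     answer = 0
--     q = []
--     heapq.heapify(scoville)
--     is_all_ok = True
--     for sco in scoville:
--         if sco < K:
--             is_all_ok = False
--             break
--     if is_all_ok == True:
--         return answer
--
--     while len(scoville) > 1:
--         first = heapq.heappop(scoville)
--         second = heapq.heappop(scoville)
--
--         mix = first + (second *2)
--         heapq.heappush(scoville, mix)
--         answer += 1
--         is_all_ok = True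
--         for sco in scoville:
--             if sco < K:
--                 is_all_ok = False
--                 break
--         if is_all_ok == True:
--             return answer
--     return -1
-- ===== SOURCE B (Python) =====
-- def _take_from_xs(xs, q, i, h):
--     # next-smallest value sits at the front of xs rather than the front of q
--     return i < len(xs) and (h == len(q) or xs[i] <= q[h])
--
-- def solution(scoville, K):
--     # No heap: sort once, then merge two queues -- the sorted input consumed from
--     # the front, and a FIFO of mixed values (which are produced in nondecreasing
--     # order, so it stays sorted). Same return value as the original; A heapifies
--     # scoville in place, B leaves the argument unmutated.
--     xs = sorted(scoville)
--     q = []            # mixes, appended in nondecreasing order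
--     i = h = 0         # consumed prefixes of xs and q
--     answer = 0
--     while True:
--         n = (len(xs) - i) + (len(q) - h)
--         if n == 0:
--             return answer
--         cur = xs[i] if _take_from_xs(xs, q, i, h) else q[h]
--         if cur >= K:
--             return answer
--         if n < 2:
--             return -1
--         if _take_from_xs(xs, q, i, h):
--             a = xs[i]; i += 1
--         else:
--             a = q[h]; h += 1
--         if _take_from_xs(xs, q, i, h):
--             b = xs[i]; i += 1
--         else:
--             b = q[h]; h += 1
--         q.append(a + 2 * b)
--         answer += 1
-- ===== Notes on version B (the rewrite author's own statement) =====
-- stated objective: faster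
-- what changed: B abandons the heap entirely: it sorts the input once and then merges two queues -- the sorted input and a FIFO of mix values (provably produced in nondecreasing order) -- so each round pops the two smallest and appends the mix in O(1), eliminating A's heapify/heappop/heappush and its per-round rescan of the whole heap against K.
import Mathlib
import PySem

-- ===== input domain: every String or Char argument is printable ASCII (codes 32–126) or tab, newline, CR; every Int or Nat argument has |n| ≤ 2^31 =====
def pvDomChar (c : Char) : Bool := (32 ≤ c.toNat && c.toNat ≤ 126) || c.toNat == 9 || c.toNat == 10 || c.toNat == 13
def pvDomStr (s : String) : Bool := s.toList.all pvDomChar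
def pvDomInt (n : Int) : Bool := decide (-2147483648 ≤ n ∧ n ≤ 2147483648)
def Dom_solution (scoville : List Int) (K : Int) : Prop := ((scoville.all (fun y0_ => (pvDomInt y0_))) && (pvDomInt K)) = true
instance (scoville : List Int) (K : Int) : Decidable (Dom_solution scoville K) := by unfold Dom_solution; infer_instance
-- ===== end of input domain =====

-- B drops the heap entirely: it sorts once and merges two queues (the sorted input
-- and a FIFO of mixes, which stays sorted). Equivalence is about the RETURN value only:
-- A heapifies its argument in place, B leaves the argument unmutated.

-- ===== PORT A =====
-- Transliteration of CPython's heapq (A does `import heapq`).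

-- heapq._siftdown: bubble newitem up from pos towards startpos.
-- `fuel` only totalizes the while loop (pos strictly decreases, so `pos` fuel is
-- enough; at fuel 0 the loop condition is already false and the same exit value is taken).
def siftdownLoop : Nat → List Int → Nat → Nat → Int → List Int
  | 0, heap, _, pos, newitem => heap.set pos newitem
  | fuel + 1, heap, startpos, pos, newitem =>
    if startpos < pos then
      let parentpos := (pos - 1) / 2
      let parent := heap.getD parentpos 0
      if newitem < parent then
        siftdownLoop fuel (heap.set pos parent) startpos parentpos newitem
      else heap.set pos newitem
    else heap.set pos newitem

def siftdown (heap : List Int) (startpos pos : Nat) : List Int :=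
  siftdownLoop pos heap startpos pos (heap.getD pos 0)

-- heapq._siftup's slide-to-leaf loop; returns the final pos together with the heap.
-- `fuel` only totalizes the loop (pos strictly increases below endpos).
def siftupLoop : Nat → List Int → Nat → Nat → Nat × List Int
  | 0, heap, _, pos => (pos, heap)
  | fuel + 1, heap, endpos, pos =>
    if 2 * pos + 1 < endpos then
      let childpos := if 2 * pos + 2 < endpos ∧ ¬ heap.getD (2 * pos + 1) 0 < heap.getD (2 * pos + 2) 0
                      then 2 * pos + 2 else 2 * pos + 1
      siftupLoop fuel (heap.set pos (heap.getD childpos 0)) endpos childpos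
    else (pos, heap)

-- heapq._siftup
def siftup (heap : List Int) (pos : Nat) : List Int :=
  let newitem := heap.getD pos 0
  let r := siftupLoop heap.length heap heap.length pos
  siftdown (r.2.set r.1 newitem) pos r.1

-- heapq.heapify: for i in reversed(range(n//2)): _siftup(x, i)
def heapifyAux (heap : List Int) : Nat → List Int
  | 0 => heap
  | i + 1 => heapifyAux (siftup heap i) i

def pyHeapify (heap : List Int) : List Int := heapifyAux heap (heap.length / 2)

def heappush (heap : List Int) (item : Int) : List Int :=
  siftdown (heap ++ [item]) 0 heap.length

def heappop (heap : List Int) : Int × List Int :=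
  let lastelt := heap.getLastD 0
  let rest := heap.dropLast
  if rest.isEmpty then (lastelt, rest)
  else (rest.getD 0 0, siftup (rest.set 0 lastelt) 0)

-- A's `for sco in scoville: if sco < K: is_all_ok = False; break` scan
def scanOkA (heap : List Int) (K : Int) : Bool :=
  match heap with
  | [] => true
  | sco :: rest => if sco < K then false else scanOkA rest K

-- A's while loop; `fuel` only totalizes it (the heap shrinks by one element per
-- iteration, so `heap.length` fuel is enough; at fuel 0 the heap is empty and the
-- loop's exit value -1 is taken, as the loop condition is false).
def loopA : Nat → List Int → Int → Int → Int
  | 0, _, _, _ => -1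
  | fuel + 1, heap, K, answer =>
    if 1 < heap.length then
      let fp := heappop heap
      let sp := heappop fp.2
      let mix := fp.1 + sp.1 * 2
      let h3 := heappush sp.2 mix
      let answer := answer + 1
      if scanOkA h3 K then answer else loopA fuel h3 K answer
    else -1

def solution (scoville : List Int) (K : Int) : Int :=
  let answer : Int := 0
  let h := pyHeapify scoville
  if scanOkA h K then answer else loopA h.length h K answer

-- ===== PORT B =====
-- B's `_take_from_xs`: the next-smallest value sits at the front of xs, not of q.
def takeXs (xs q : List Int) (i h : Nat) : Bool :=
  decide (i < xs.length) && (decide (h = q.length) || decide (xs.getD i 0 <= q.getD h 0))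

-- B's `while True` loop over the two queues (i, h are the consumed prefixes of xs
-- and of the mix queue q); `fuel` only totalizes it (each recursing iteration
-- shrinks the live element count by one; at fuel 0 `answer` is returned as at the
-- loop's n = 0 exit, which is the only reachable exit there).
def loopB : Nat → List Int → List Int → Nat → Nat → Int → Int → Int
  | 0, _, _, _, _, _, answer => answer
  | fuel + 1, xs, q, i, h, K, answer =>
    if (xs.length - i) + (q.length - h) = 0 then answer
    else if K ≤ (if takeXs xs q i h then xs.getD i 0 else q.getD h 0) then answer
    else if (xs.length - i) + (q.length - h) < 2 then -1
    else if takeXs xs q i h then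
      -- a = xs[i]; i += 1
      if takeXs xs q (i + 1) h then
        loopB fuel xs (q ++ [xs.getD i 0 + 2 * xs.getD (i + 1) 0]) (i + 2) h K (answer + 1)
      else
        loopB fuel xs (q ++ [xs.getD i 0 + 2 * q.getD h 0]) (i + 1) (h + 1) K (answer + 1)
    else
      -- a = q[h]; h += 1
      if takeXs xs q i (h + 1) then
        loopB fuel xs (q ++ [q.getD h 0 + 2 * xs.getD i 0]) (i + 1) (h + 1) K (answer + 1)
      else
        loopB fuel xs (q ++ [q.getD h 0 + 2 * q.getD (h + 1) 0]) i (h + 2) K (answer + 1)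

def solution_alt (scoville : List Int) (K : Int) : Int :=
  let xs := PySem.List.sorted scoville (fun x => x) false
  loopB (xs.length + 1) xs [] 0 0 K 0

-- ===== PRECONDITION & SPEC =====
def Spec_solution (scoville : List Int) (K : Int) (out : Int) : Prop := out = solution_alt scoville K
instance (scoville : List Int) (K : Int) (out : Int) : Decidable (Spec_solution scoville K out) := by unfold Spec_solution; infer_instance

-- ===== CLAIM (what is proved, stated in full; the proofs are below) =====
def Claim_equal_solution : Prop := ∀ (scoville : List Int) (K : Int), Dom_solution scoville K → Spec_solution scoville K (solution scoville K)

-- ===== LEMMAS AND PROOFS =====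

-- ---- lengths ----

theorem length_siftdownLoop : ∀ (fuel : Nat) (heap : List Int) (startpos pos : Nat) (newitem : Int),
    (siftdownLoop fuel heap startpos pos newitem).length = heap.length := by
  intro fuel
  induction fuel with
  | zero => intro heap startpos pos newitem; simp [siftdownLoop]
  | succ fuel ih =>
    intro heap startpos pos newitem
    rw [siftdownLoop]
    split
    · dsimp only
      split
      · rw [ih]; simp
      · simp
    · simp

theorem length_siftupLoop : ∀ (fuel : Nat) (heap : List Int) (endpos pos : Nat),
    (siftupLoop fuel heap endpos pos).2.length = heap.length := by
  intro fuel
  induction fuel with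
  | zero => intro heap endpos pos; rfl
  | succ fuel ih =>
    intro heap endpos pos
    rw [siftupLoop]
    split
    · rw [ih]; simp
    · rfl

theorem length_siftup (heap : List Int) (pos : Nat) :
    (siftup heap pos).length = heap.length := by
  simp [siftup, siftdown, length_siftdownLoop, length_siftupLoop]

theorem length_heappush (heap : List Int) (item : Int) :
    (heappush heap item).length = heap.length + 1 := by
  simp [heappush, siftdown, length_siftdownLoop]

theorem length_heappop (heap : List Int) :
    (heappop heap).2.length = heap.length - 1 := by
  unfold heappop
  by_cases h : heap.dropLast.isEmpty <;> simp [h, length_siftup]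

-- ---- the heap-order invariant of port A ----

-- heap-order property for positions whose parent index is ≥ i (i = 0 is the full heap property)
def PartialHeap (h : List Int) (i : Nat) : Prop :=
  ∀ j, 0 < j → j < h.length → i ≤ (j - 1) / 2 → h.getD ((j - 1) / 2) 0 ≤ h.getD j 0

-- i lies on the parent chain of pos
def isAnc (i pos : Nat) : Bool :=
  if pos ≤ i then pos == i else isAnc i ((pos - 1) / 2)
termination_by pos
decreasing_by omega

theorem isAnc_le {i : Nat} : ∀ pos, isAnc i pos = true → i ≤ pos := by
  intro pos
  induction pos using Nat.strong_induction_on with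
  | _ pos ih =>
    intro h
    unfold isAnc at h
    split at h
    · simp at h; omega
    · have := ih ((pos - 1) / 2) (by omega) h
      omega

theorem isAnc_parent {i pos : Nat} (hlt : i < pos) (h : isAnc i pos = true) :
    isAnc i ((pos - 1) / 2) = true := by
  unfold isAnc at h
  split at h
  · omega
  · exact h

theorem isAnc_zero (pos : Nat) : isAnc 0 pos = true := by
  induction pos using Nat.strong_induction_on with
  | _ pos ih =>
    unfold isAnc
    split
    · simp; omega
    · exact ih _ (by omega)

theorem isAnc_self (i : Nat) : isAnc i i = true := by
  unfold isAnc; simp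

theorem getD_set_self (l : List Int) (i : Nat) (x : Int) (h : i < l.length) :
    (l.set i x).getD i 0 = x := by
  simp [List.getD_eq_getElem?_getD, h]

theorem getD_set_ne (l : List Int) {i j : Nat} (x : Int) (h : i ≠ j) :
    (l.set i x).getD j 0 = l.getD j 0 := by
  simp [List.getD_eq_getElem?_getD, h]

-- core correctness of heapq._siftdown (bubble-up)
-- exit step: placing `newitem` at `pos = i` (shared by the fuel-0 and loop-exit cases)
theorem siftdown_place (i : Nat) (pos : Nat) (heap : List Int) (newitem : Int)
    (hpos : pos < heap.length) (hpi : pos = i)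
    (ha : ∀ j, 0 < j → j < heap.length → i ≤ (j - 1) / 2 → j ≠ pos →
        heap.getD ((j - 1) / 2) 0 ≤ heap.getD j 0)
    (hc : ∀ c, 0 < c → c < heap.length → (c - 1) / 2 = pos → newitem ≤ heap.getD c 0) :
    PartialHeap (heap.set pos newitem) i := by
  subst hpi
  intro j hj0 hjlen hreg
  simp only [List.length_set] at hjlen
  by_cases hjp : j = pos
  · exfalso; omega
  · by_cases hpj : (j - 1) / 2 = pos
    · rw [hpj, getD_set_self heap _ _ hpos, getD_set_ne heap _ (by omega)]
      exact hc j hj0 hjlen hpj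
    · rw [getD_set_ne heap _ (by omega), getD_set_ne heap _ (by omega)]
      exact ha j hj0 hjlen hreg hjp

theorem siftdownLoop_spec (i : Nat) :
    ∀ (fuel : Nat) pos (heap : List Int) (newitem : Int),
    pos ≤ fuel → pos < heap.length → isAnc i pos = true →
    (∀ j, 0 < j → j < heap.length → i ≤ (j - 1) / 2 → j ≠ pos →
        heap.getD ((j - 1) / 2) 0 ≤ heap.getD j 0) →
    (i < pos → ∀ c, 0 < c → c < heap.length → (c - 1) / 2 = pos →
        heap.getD ((pos - 1) / 2) 0 ≤ heap.getD c 0) →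
    (∀ c, 0 < c → c < heap.length → (c - 1) / 2 = pos → newitem ≤ heap.getD c 0) →
    PartialHeap (siftdownLoop fuel heap i pos newitem) i := by
  intro fuel
  induction fuel with
  | zero =>
    intro pos heap newitem hf hpos hanc ha hb hc
    have hpi : pos = i := by have := isAnc_le _ hanc; omega
    exact siftdown_place i pos heap newitem hpos hpi ha hc
  | succ fuel ih =>
    intro pos heap newitem hf hpos hanc ha hb hc
    rw [siftdownLoop]
    split
    · rename_i hip
      dsimp only
      split
      · rename_i hlt
        -- newitem < parent: move parent down, recurse at parentpos
        apply ih ((pos - 1) / 2) _ newitem (by omega)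
        · simpa using by omega
        · exact isAnc_parent hip hanc
        · -- (a')
          intro j hj0 hjlen hreg hjne
          simp only [List.length_set] at hjlen
          by_cases hjp : j = pos
          · subst hjp
            rw [getD_set_ne heap _ (by omega), getD_set_self heap _ _ hpos]
          · by_cases hpj : (j - 1) / 2 = pos
            · rw [hpj, getD_set_self heap _ _ hpos, getD_set_ne heap _ (by omega)]
              exact hb hip j hj0 hjlen hpj
            · rw [getD_set_ne heap _ (by omega), getD_set_ne heap _ (by omega)]
              exact ha j hj0 hjlen hreg hjp
        · -- (b')
          intro hipp c hc0 hclen hcp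
          simp only [List.length_set] at hclen
          have hgne : ((pos - 1) / 2 - 1) / 2 ≠ pos := by omega
          have hpreg : i ≤ ((pos - 1) / 2 - 1) / 2 :=
            isAnc_le _ (isAnc_parent hipp (isAnc_parent hip hanc))
          have hgp : heap.getD (((pos - 1) / 2 - 1) / 2) 0 ≤ heap.getD ((pos - 1) / 2) 0 :=
            ha ((pos - 1) / 2) (by omega) (by omega) hpreg (by omega)
          by_cases hcpos : c = pos
          · subst hcpos
            rw [getD_set_ne heap _ (by omega), getD_set_self heap _ _ hpos]
            exact hgp
          · rw [getD_set_ne heap _ (by omega), getD_set_ne heap _ (by omega)]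
            refine le_trans hgp ?_
            rw [← hcp]
            exact ha c hc0 hclen (by omega) hcpos
        · -- (c')
          intro c hc0 hclen hcp
          simp only [List.length_set] at hclen
          by_cases hcpos : c = pos
          · subst hcpos
            rw [getD_set_self heap _ _ hpos]
            omega
          · rw [getD_set_ne heap _ (by omega)]
            have hple : i ≤ (pos - 1) / 2 := isAnc_le _ (isAnc_parent hip hanc)
            refine le_trans (le_of_lt hlt) ?_
            rw [← hcp]
            exact ha c hc0 hclen (by omega) hcpos
      · rename_i hnlt
        -- parent ≤ newitem: place newitem at pos
        intro j hj0 hjlen hreg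
        simp only [List.length_set] at hjlen
        by_cases hjp : j = pos
        · subst hjp
          rw [getD_set_ne heap _ (by omega), getD_set_self heap _ _ hpos]
          omega
        · by_cases hpj : (j - 1) / 2 = pos
          · rw [hpj, getD_set_self heap _ _ hpos, getD_set_ne heap _ (by omega)]
            exact hc j hj0 hjlen hpj
          · rw [getD_set_ne heap _ (by omega), getD_set_ne heap _ (by omega)]
            exact ha j hj0 hjlen hreg hjp
    · rename_i hnip
      have hpi : pos = i := by have := isAnc_le _ hanc; omega
      exact siftdown_place i pos heap newitem hpos hpi ha hc

-- core correctness of heapq._siftup's slide loop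
theorem siftupLoop_spec (i : Nat) :
    ∀ (fuel : Nat) (heap : List Int) pos,
    heap.length ≤ fuel + pos → pos < heap.length → isAnc i pos = true →
    (∀ j, 0 < j → j < heap.length → i ≤ (j - 1) / 2 → ((j - 1) / 2 = pos → i < pos) →
        heap.getD ((j - 1) / 2) 0 ≤ heap.getD j 0) →
    (siftupLoop fuel heap heap.length pos).1 < heap.length ∧
    heap.length ≤ 2 * (siftupLoop fuel heap heap.length pos).1 + 1 ∧
    isAnc i (siftupLoop fuel heap heap.length pos).1 = true ∧
    (∀ j, 0 < j → j < heap.length → i ≤ (j - 1) / 2 →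
        ((j - 1) / 2 = (siftupLoop fuel heap heap.length pos).1 → i < (siftupLoop fuel heap heap.length pos).1) →
        (siftupLoop fuel heap heap.length pos).2.getD ((j - 1) / 2) 0 ≤ (siftupLoop fuel heap heap.length pos).2.getD j 0) := by
  intro fuel
  induction fuel with
  | zero =>
    intro heap pos hk hpos hanc hinv
    exact ⟨hpos, by omega, hanc, hinv⟩
  | succ fuel ih =>
    intro heap pos hk hpos hanc hinv
    by_cases hcl : 2 * pos + 1 < heap.length
    · -- one slide step
      set c : Nat := if 2 * pos + 2 < heap.length ∧
          ¬ heap.getD (2 * pos + 1) 0 < heap.getD (2 * pos + 2) 0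
          then 2 * pos + 2 else 2 * pos + 1 with hc
      have hcchild : (c - 1) / 2 = pos := by
        rw [hc]; split <;> omega
      have hcgt : pos < c := by rw [hc]; split <;> omega
      have hclt : c < heap.length := by
        rw [hc]; split
        · rename_i hx; exact hx.1
        · exact hcl
      have hmin : ∀ s, (s - 1) / 2 = pos → 0 < s → s < heap.length →
          heap.getD c 0 ≤ heap.getD s 0 := by
        intro s hs hs0 hslen
        have hs' : s = 2 * pos + 1 ∨ s = 2 * pos + 2 := by omega
        rw [hc]
        split
        · rename_i hx
          rcases hs' with h | h <;> subst h
          · omega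
          · exact le_refl _
        · rename_i hx
          rcases hs' with h | h <;> subst h
          · exact le_refl _
          · rw [Classical.not_and_iff_not_or_not] at hx
            rcases hx with h | h
            · omega
            · rw [Classical.not_not] at h; omega
      have hancc : isAnc i c = true := by
        rw [isAnc]
        have : ¬ c ≤ i := by have := isAnc_le _ hanc; omega
        simp only [this, if_false]
        rw [hcchild]
        exact hanc
      set heap' := heap.set pos (heap.getD c 0) with hh'
      have hlen' : heap'.length = heap.length := by simp [hh']
      have hstep : siftupLoop (fuel + 1) heap heap.length pos = siftupLoop fuel heap' heap.length c := by
        rw [siftupLoop]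
        rw [if_pos hcl]
      have hinv' : ∀ j, 0 < j → j < heap'.length → i ≤ (j - 1) / 2 → ((j - 1) / 2 = c → i < c) →
          heap'.getD ((j - 1) / 2) 0 ≤ heap'.getD j 0 := by
        intro j hj0 hjlen hreg _
        rw [hlen'] at hjlen
        by_cases hjp : j = pos
        · -- edge into the old hole
          subst hjp
          have hji : i < j := by
            rcases Nat.lt_or_ge i j with h | h
            · exact h
            · exfalso; omega
          have h1 : heap.getD ((j - 1) / 2) 0 ≤ heap.getD j 0 :=
            hinv j hj0 hjlen hreg (by omega)
          have h2 := hinv c (by omega) hclt (by omega) (by omega)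
          rw [hcchild] at h2
          rw [hh', getD_set_ne heap _ (by omega), getD_set_self heap _ _ hpos]
          omega
        · by_cases hpj : (j - 1) / 2 = pos
          · rw [hh', hpj, getD_set_self heap _ _ hpos, getD_set_ne heap _ (by omega)]
            exact hmin j hpj hj0 hjlen
          · rw [hh', getD_set_ne heap _ (by omega), getD_set_ne heap _ (by omega)]
            exact hinv j hj0 hjlen hreg (by omega)
      have hrec := ih heap' c (by rw [hlen']; omega) (by omega) hancc hinv'
      rw [hlen'] at hrec
      rw [hstep]
      exact hrec
    · rw [siftupLoop]
      rw [if_neg hcl]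
      exact ⟨hpos, by omega, hanc, hinv⟩

theorem siftup_spec (heap : List Int) (i : Nat) (hi : i < heap.length)
    (hp : PartialHeap heap (i + 1)) : PartialHeap (siftup heap i) i := by
  obtain ⟨h1, h2, h3, h4⟩ := siftupLoop_spec i heap.length heap i (by omega) hi (isAnc_self i)
    (fun j hj0 hjl hreg hguard => hp j hj0 hjl (by
      by_cases h : (j - 1) / 2 = i
      · exact absurd (hguard h) (by omega)
      · omega))
  have hlr : (siftupLoop heap.length heap heap.length i).2.length = heap.length :=
    length_siftupLoop heap.length heap heap.length i
  show PartialHeap (siftdown ((siftupLoop heap.length heap heap.length i).2.set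
      (siftupLoop heap.length heap heap.length i).1 (heap.getD i 0)) i
      (siftupLoop heap.length heap heap.length i).1) i
  unfold siftdown
  rw [getD_set_self _ _ _ (by omega)]
  apply siftdownLoop_spec i _ (siftupLoop heap.length heap heap.length i).1 _ _ le_rfl
    (by simp; omega) h3
  · intro j hj0 hjl hreg hne
    simp only [List.length_set, hlr] at hjl
    have hnp : (j - 1) / 2 ≠ (siftupLoop heap.length heap heap.length i).1 := by omega
    rw [getD_set_ne _ _ (by omega : (siftupLoop heap.length heap heap.length i).1 ≠ (j - 1) / 2),
      getD_set_ne _ _ (by omega : (siftupLoop heap.length heap heap.length i).1 ≠ j)]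
    exact h4 j hj0 (by omega) hreg (fun hh => absurd hh hnp)
  · intro _ c hc0 hcl hcp
    simp only [List.length_set, hlr] at hcl
    omega
  · intro c hc0 hcl hcp
    simp only [List.length_set, hlr] at hcl
    omega

theorem heapifyAux_spec : ∀ i (heap : List Int), 2 * i ≤ heap.length → PartialHeap heap i →
    PartialHeap (heapifyAux heap i) 0 := by
  intro i
  induction i with
  | zero => intro heap _ hp; exact hp
  | succ i ih =>
    intro heap hle hp
    show PartialHeap (heapifyAux (siftup heap i) i) 0
    apply ih
    · rw [length_siftup]; omega
    · exact siftup_spec heap i (by omega) hp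

theorem pyHeapify_isHeap (heap : List Int) : PartialHeap (pyHeapify heap) 0 := by
  unfold pyHeapify
  apply heapifyAux_spec
  · omega
  · intro j hj0 hjl hreg
    exfalso; omega

theorem getD_dropLast (l : List Int) (j : Nat) (h : j < l.length - 1) :
    l.dropLast.getD j 0 = l.getD j 0 := by
  have h2 : j < l.length := by omega
  simp [List.getD_eq_getElem?_getD, h, List.getElem?_eq_getElem h2]

theorem heappop_isHeap (heap : List Int) (hp : PartialHeap heap 0) :
    PartialHeap (heappop heap).2 0 := by
  unfold heappop
  by_cases he : heap.dropLast.isEmpty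
  · simp only [he, if_true]
    intro j hj0 hjl _
    rw [List.isEmpty_iff.mp he] at hjl
    simp at hjl
  · simp only [he]
    have hne : heap.dropLast ≠ [] := by simpa [List.isEmpty_iff] using he
    have hpos := List.length_pos_iff.mpr hne
    apply siftup_spec
    · simp only [List.length_set]
      exact hpos
    · intro j hj0 hjl hreg
      simp only [List.length_set] at hjl
      have hdl : heap.dropLast.length = heap.length - 1 := by simp
      rw [getD_set_ne _ _ (by omega), getD_set_ne _ _ (by omega),
        getD_dropLast _ _ (by omega), getD_dropLast _ _ (by omega)]
      exact hp j hj0 (by omega) (by omega)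

theorem getD_append_left (l : List Int) (x : Int) (j : Nat) (h : j < l.length) :
    (l ++ [x]).getD j 0 = l.getD j 0 := by
  simp [List.getD_eq_getElem?_getD, List.getElem?_append_left h]

theorem heappush_isHeap (heap : List Int) (item : Int) (hp : PartialHeap heap 0) :
    PartialHeap (heappush heap item) 0 := by
  unfold heappush siftdown
  have hx : (heap ++ [item]).getD heap.length 0 = item := by
    simp [List.getD_eq_getElem?_getD]
  rw [hx]
  apply siftdownLoop_spec 0 heap.length heap.length (heap ++ [item]) item le_rfl (by simp)
    (isAnc_zero _)
  · intro j hj0 hjl hreg hne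
    simp only [List.length_append, List.length_singleton] at hjl
    rw [getD_append_left _ _ _ (by omega), getD_append_left _ _ _ (by omega)]
    exact hp j hj0 (by omega) (by omega)
  · intro _ c hc0 hcl hcp
    simp only [List.length_append, List.length_singleton] at hcl
    omega
  · intro c hc0 hcl hcp
    simp only [List.length_append, List.length_singleton] at hcl
    omega

theorem top_min (heap : List Int) (hp : PartialHeap heap 0) :
    ∀ j, j < heap.length → heap.getD 0 0 ≤ heap.getD j 0 := by
  intro j
  induction j using Nat.strong_induction_on with
  | _ j ih =>
    intro hj
    rcases Nat.eq_zero_or_pos j with h0 | h0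
    · subst h0; exact le_refl _
    · calc heap.getD 0 0 ≤ heap.getD ((j - 1) / 2) 0 := ih _ (by omega) (by omega)
        _ ≤ heap.getD j 0 := hp j h0 hj (by omega)

theorem scanOkA_iff (heap : List Int) (K : Int) :
    scanOkA heap K = true ↔ ∀ x ∈ heap, ¬ x < K := by
  induction heap with
  | nil => simp [scanOkA]
  | cons a t ih =>
    simp only [scanOkA]
    split <;> simp_all

theorem getD_mem (l : List Int) (x : Int) (h : x ∈ l) :
    ∃ j, j < l.length ∧ l.getD j 0 = x := by
  obtain ⟨j, hj, e⟩ := List.mem_iff_getElem.mp h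
  exact ⟨j, hj, by rw [List.getD_eq_getElem _ _ hj]; exact e⟩

theorem head_mem_getD (l : List Int) (h : l ≠ []) : l.getD 0 0 ∈ l := by
  cases l with
  | nil => exact absurd rfl h
  | cons a t => simp [List.getD]

-- ---- permutation lemmas: every heapq operation permutes the list ----

theorem count_set (v : Int) : ∀ (l : List Int) (i : Nat) (a : Int), i < l.length →
    (l.set i a).count v + (if l.getD i 0 = v then 1 else 0)
      = l.count v + (if a = v then 1 else 0) := by
  intro l
  induction l with
  | nil => intro i a h; simp at h
  | cons b t ih =>
    intro i a h
    cases i with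
    | zero =>
      simp only [List.set, List.getD_cons_zero, List.count_cons, beq_iff_eq]
      split_ifs <;> omega
    | succ i =>
      have := ih i a (by simp only [List.length_cons] at h; omega)
      simp only [List.set, List.getD_cons_succ, List.count_cons, beq_iff_eq]
      split_ifs at * <;> omega

theorem swap_perm (l : List Int) (i j : Nat) (x : Int)
    (hij : i ≠ j) (hi : i < l.length) (hj : j < l.length) :
    ((l.set i (l.getD j 0)).set j x).Perm (l.set i x) := by
  rw [List.perm_iff_count]
  intro v
  have hlen : (l.set i (l.getD j 0)).length = l.length := by simp
  have h1 := count_set v (l.set i (l.getD j 0)) j x (by omega)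
  have h2 := count_set v l i (l.getD j 0) hi
  have h3 := count_set v l i x hi
  rw [getD_set_ne l (l.getD j 0) (by omega : i ≠ j)] at h1
  split_ifs at * <;> omega

theorem siftdownLoop_perm : ∀ (fuel : Nat) (heap : List Int) (sp pos : Nat) (newitem : Int),
    pos < heap.length →
    (siftdownLoop fuel heap sp pos newitem).Perm (heap.set pos newitem) := by
  intro fuel
  induction fuel with
  | zero => intro heap sp pos newitem h; exact List.Perm.refl _
  | succ fuel ih =>
    intro heap sp pos newitem hpos
    rw [siftdownLoop]
    split
    · rename_i hsp
      dsimp only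
      split
      · have hpp : (pos - 1) / 2 < heap.length := by omega
        have hne : pos ≠ (pos - 1) / 2 := by omega
        refine (ih _ sp _ newitem (by simpa using hpp)).trans ?_
        exact swap_perm heap pos ((pos - 1) / 2) newitem (by omega) hpos hpp
      · exact List.Perm.refl _
    · exact List.Perm.refl _

theorem siftupLoop_perm : ∀ (fuel : Nat) (heap : List Int) (pos : Nat),
    pos < heap.length →
    (siftupLoop fuel heap heap.length pos).1 < heap.length ∧
    ∀ x, ((siftupLoop fuel heap heap.length pos).2.set (siftupLoop fuel heap heap.length pos).1 x).Perm
      (heap.set pos x) := by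
  intro fuel
  induction fuel with
  | zero => intro heap pos h; exact ⟨h, fun x => List.Perm.refl _⟩
  | succ fuel ih =>
    intro heap pos hpos
    by_cases hcl : 2 * pos + 1 < heap.length
    · set c : Nat := if 2 * pos + 2 < heap.length ∧
          ¬ heap.getD (2 * pos + 1) 0 < heap.getD (2 * pos + 2) 0
          then 2 * pos + 2 else 2 * pos + 1 with hc
      have hclt : c < heap.length := by
        rw [hc]; split
        · rename_i hx; exact hx.1
        · exact hcl
      have hpc : pos ≠ c := by rw [hc]; split <;> omega
      set heap' := heap.set pos (heap.getD c 0) with hh'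
      have hlen' : heap'.length = heap.length := by simp [hh']
      have hstep : siftupLoop (fuel + 1) heap heap.length pos = siftupLoop fuel heap' heap.length c := by
        rw [siftupLoop, if_pos hcl]
      obtain ⟨hr1, hr2⟩ := ih heap' c (by omega)
      rw [hlen'] at hr1
      refine ⟨by rw [hstep]; exact hr1, fun x => ?_⟩
      rw [hstep]
      have := hr2 x
      rw [hlen'] at this
      refine this.trans ?_
      exact swap_perm heap pos c x hpc hpos hclt
    · rw [siftupLoop, if_neg hcl]
      exact ⟨hpos, fun x => List.Perm.refl _⟩

theorem set_getD_self (l : List Int) (i : Nat) (h : i < l.length) :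
    l.set i (l.getD i 0) = l := by
  rw [List.getD_eq_getElem _ _ h]
  exact List.set_getElem_self h

theorem siftup_perm (heap : List Int) (pos : Nat) (h : pos < heap.length) :
    (siftup heap pos).Perm heap := by
  unfold siftup siftdown
  obtain ⟨hr1, hr2⟩ := siftupLoop_perm heap.length heap pos h
  have hlr : (siftupLoop heap.length heap heap.length pos).2.length = heap.length :=
    length_siftupLoop _ _ _ _
  refine (siftdownLoop_perm _ _ _ _ _ (by simp only [List.length_set, hlr]; exact hr1)).trans ?_
  rw [getD_set_self _ _ _ (by omega), List.set_set]
  exact (hr2 _).trans (by rw [set_getD_self heap pos h])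

theorem heapifyAux_perm : ∀ (i : Nat) (heap : List Int), 2 * i ≤ heap.length →
    (heapifyAux heap i).Perm heap := by
  intro i
  induction i with
  | zero => intro heap _; exact List.Perm.refl _
  | succ i ih =>
    intro heap hle
    show (heapifyAux (siftup heap i) i).Perm heap
    refine (ih _ (by rw [length_siftup]; omega)).trans ?_
    exact siftup_perm heap i (by omega)

theorem pyHeapify_perm (heap : List Int) : (pyHeapify heap).Perm heap :=
  heapifyAux_perm _ _ (by omega)

theorem set_append_last : ∀ (l : List Int) (x : Int), (l ++ [x]).set l.length x = l ++ [x] := by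
  intro l x
  induction l with
  | nil => rfl
  | cons a t ih => simp only [List.cons_append, List.length_cons, List.set_cons_succ, ih]

theorem heappush_perm (heap : List Int) (item : Int) :
    (heappush heap item).Perm (heap ++ [item]) := by
  unfold heappush siftdown
  have hx : (heap ++ [item]).getD heap.length 0 = item := by
    simp [List.getD_eq_getElem?_getD]
  rw [hx]
  refine (siftdownLoop_perm _ _ _ _ _ (by simp)).trans ?_
  rw [set_append_last heap item]

theorem heappop_fst (heap : List Int) (h : heap ≠ []) :
    (heappop heap).1 = heap.getD 0 0 := by
  match heap with
  | [a] => rfl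
  | a :: b :: t =>
    unfold heappop
    have hne : (a :: b :: t).dropLast.isEmpty = false := by
      simp [List.dropLast]
    simp only [hne, Bool.false_eq_true, if_false]
    rfl

theorem heappop_perm (heap : List Int) (h : heap ≠ []) :
    heap.Perm ((heappop heap).1 :: (heappop heap).2) := by
  match heap with
  | [a] => exact List.Perm.refl _
  | a :: b :: t =>
    unfold heappop
    have hne : (a :: b :: t).dropLast.isEmpty = false := by
      simp [List.dropLast]
    simp only [hne, Bool.false_eq_true, if_false]
    have hdl : (a :: b :: t).dropLast = a :: (b :: t).dropLast := rfl
    have hset : (a :: b :: t).dropLast.set 0 ((a :: b :: t).getLastD 0)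
        = (a :: b :: t).getLastD 0 :: (b :: t).dropLast := by
      rw [hdl]; rfl
    have hlast : (b :: t).dropLast ++ [(a :: b :: t).getLastD 0] = b :: t := by
      have h1 : (a :: b :: t).getLastD 0 = (b :: t).getLast (by simp) := by
        rw [List.getLastD_eq_getLast?, List.getLast?_cons_cons,
          List.getLast?_eq_some_getLast (by simp)]
        rfl
      rw [h1]
      exact List.dropLast_concat_getLast (by simp)
    have hsp : (siftup ((a :: b :: t).dropLast.set 0 ((a :: b :: t).getLastD 0)) 0).Perm
        ((a :: b :: t).getLastD 0 :: (b :: t).dropLast) := by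
      rw [hset]
      exact siftup_perm _ 0 (by simp)
    refine List.Perm.trans ?_ (List.Perm.cons _ hsp.symm)
    have : (a :: b :: t).dropLast.getD 0 0 = a := by rw [hdl]; rfl
    rw [this]
    refine List.Perm.cons _ ?_
    conv_lhs => rw [← hlast]
    exact List.perm_append_singleton _ _

-- ---- the two-queue side (port B) ----

theorem takeXs_iff (xs q : List Int) (i h : Nat) :
    takeXs xs q i h = true ↔ (i < xs.length ∧ (h = q.length ∨ xs.getD i 0 ≤ q.getD h 0)) := by
  simp [takeXs]

theorem getD_append_l (l1 l2 : List Int) (p : Nat) (h : p < l1.length) :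
    (l1 ++ l2).getD p 0 = l1.getD p 0 := by
  simp [List.getD_eq_getElem?_getD, List.getElem?_append_left h]

theorem getD_append_r (l1 l2 : List Int) (k : Nat) :
    (l1 ++ l2).getD (l1.length + k) 0 = l2.getD k 0 := by
  rw [List.getD_eq_getElem?_getD, List.getD_eq_getElem?_getD,
    List.getElem?_append_right (by omega : l1.length ≤ l1.length + k)]
  simp

theorem getD_drop (l : List Int) (n k : Nat) :
    (l.drop n).getD k 0 = l.getD (n + k) 0 := by
  simp [List.getD_eq_getElem?_getD, List.getElem?_drop]

theorem drop_cons_getD (l : List Int) (n : Nat) (h : n < l.length) :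
    l.drop n = l.getD n 0 :: l.drop (n + 1) := by
  rw [List.getD_eq_getElem _ _ h]
  exact List.drop_eq_getElem_cons h

theorem getD_mem_self (l : List Int) (p : Nat) (h : p < l.length) : l.getD p 0 ∈ l := by
  rw [List.getD_eq_getElem _ _ h]
  exact List.getElem_mem h

theorem sorted_head_min (xs : List Int) (hs : xs.Pairwise (· ≤ ·)) (hne : xs ≠ []) :
    ∀ y ∈ xs, xs.getD 0 0 ≤ y := by
  match xs with
  | x :: t =>
    intro y hy
    rw [List.pairwise_cons] at hs
    rcases List.mem_cons.mp hy with h | h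
    · subst h; exact le_refl _
    · exact hs.1 y h

theorem getLastD_irrel (l : List Int) (h : l ≠ []) (d d' : Int) :
    l.getLastD d = l.getLastD d' := by
  match l with
  | [a] => simp [List.getLastD_cons]
  | a :: b :: t => simp only [List.getLastD_cons]

theorem getLastD_cons_ne (a : Int) (l : List Int) (h : l ≠ []) :
    (a :: l).getLastD 0 = l.getLastD 0 := by
  rw [List.getLastD_cons]
  exact getLastD_irrel l h a 0

theorem getLastD_mem (l : List Int) (h : l ≠ []) : l.getLastD 0 ∈ l := by
  rw [List.getLastD_eq_getLast?, List.getLast?_eq_some_getLast h]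
  exact List.getLast_mem _

theorem sorted_le_getLastD (l : List Int) (hs : l.Pairwise (· ≤ ·)) :
    ∀ y ∈ l, y ≤ l.getLastD 0 := by
  induction l with
  | nil => simp
  | cons a t ih =>
    intro y hy
    rw [List.pairwise_cons] at hs
    rcases List.mem_cons.mp hy with hya | hyt
    · subst hya
      cases t with
      | nil => simp [List.getLastD_cons]
      | cons b t' =>
        rw [getLastD_cons_ne _ _ (by simp)]
        exact hs.1 _ (getLastD_mem (b :: t') (by simp))
    · cases t with
      | nil => cases hyt
      | cons b t' =>
        rw [getLastD_cons_ne _ _ (by simp)]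
        exact ih hs.2 y hyt

theorem getD_dropLast2 (l : List Int) (j : Nat) (h : j < l.length - 1) :
    l.dropLast.getD j 0 = l.getD j 0 := getD_dropLast l j h

-- a heap and any list holding the same multiset have the heap's top = the list's minimum
theorem heap_top_eq_min (heap l : List Int) (hperm : heap.Perm l) (hp : PartialHeap heap 0)
    (v : Int) (hv : v ∈ l) (hmin : ∀ y ∈ l, v ≤ y) : heap.getD 0 0 = v := by
  have hne : heap ≠ [] := by
    intro h; subst h
    rw [(List.Perm.nil_eq hperm).symm] at hv
    cases hv
  have h1 : v ≤ heap.getD 0 0 := hmin _ (hperm.mem_iff.mp (head_mem_getD heap hne))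
  have h2 : heap.getD 0 0 ≤ v := by
    obtain ⟨j, hj, he⟩ := getD_mem heap v (hperm.mem_iff.mpr hv)
    rw [← he]
    exact top_min heap hp j hj
  omega

theorem pairwise_drop_le (l : List Int) (n : Nat) (hs : l.Pairwise (· ≤ ·)) :
    (l.drop n).Pairwise (· ≤ ·) := hs.drop

-- popping the front of the smaller queue: the popped value is the minimum of the live list
theorem popOne_true (xs q : List Int) (i h : Nat)
    (hxs : xs.Pairwise (· ≤ ·)) (hq : (q.drop h).Pairwise (· ≤ ·))
    (ht : takeXs xs q i h = true) :
    i < xs.length ∧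
    xs.drop i ++ q.drop h = xs.getD i 0 :: (xs.drop (i + 1) ++ q.drop h) ∧
    (∀ y ∈ xs.drop i ++ q.drop h, xs.getD i 0 ≤ y) := by
  obtain ⟨hi', hor⟩ := (takeXs_iff xs q i h).mp ht
  refine ⟨hi', by rw [drop_cons_getD xs i hi']; rfl, ?_⟩
  intro y hy
  rcases List.mem_append.mp hy with hy | hy
  · have hhead : (xs.drop i).getD 0 0 = xs.getD i 0 := by simp [getD_drop]
    rw [← hhead]
    exact sorted_head_min _ (pairwise_drop_le xs i hxs)
      (by intro hnil; rw [hnil] at hy; cases hy) y hy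
  · have hhne : q.drop h ≠ [] := by intro hnil; rw [hnil] at hy; cases hy
    have hhlt : h < q.length := by
      have := List.length_drop (l := q) (i := h)
      have hpos : 0 < (q.drop h).length := List.length_pos_iff.mpr hhne
      omega
    rcases hor with hor | hor
    · exfalso; omega
    · have hhead : (q.drop h).getD 0 0 = q.getD h 0 := by simp [getD_drop]
      refine le_trans hor ?_
      rw [← hhead]
      exact sorted_head_min _ hq hhne y hy

theorem popOne_false (xs q : List Int) (i h : Nat)
    (hh : h ≤ q.length)
    (hxs : xs.Pairwise (· ≤ ·)) (hq : (q.drop h).Pairwise (· ≤ ·))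
    (hne : xs.drop i ++ q.drop h ≠ [])
    (ht : takeXs xs q i h = false) :
    h < q.length ∧
    (xs.drop i ++ q.drop h).Perm (q.getD h 0 :: (xs.drop i ++ q.drop (h + 1))) ∧
    (∀ y ∈ xs.drop i ++ q.drop h, q.getD h 0 ≤ y) := by
  have htn : ¬ (i < xs.length ∧ (h = q.length ∨ xs.getD i 0 ≤ q.getD h 0)) := by
    rw [← takeXs_iff]; simp [ht]
  have hhlt : h < q.length := by
    by_cases hi' : i < xs.length
    · have : ¬ (h = q.length ∨ xs.getD i 0 ≤ q.getD h 0) := fun hc => htn ⟨hi', hc⟩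
      push_neg at this
      omega
    · have hRnil : xs.drop i = [] := List.drop_eq_nil_of_le (by omega)
      rw [hRnil, List.nil_append] at hne
      have hpos : 0 < (q.drop h).length := List.length_pos_iff.mpr hne
      have := List.length_drop (l := q) (i := h)
      omega
  have hScons : q.drop h = q.getD h 0 :: q.drop (h + 1) := drop_cons_getD q h hhlt
  refine ⟨hhlt, ?_, ?_⟩
  · rw [hScons]
    exact List.perm_middle
  · intro y hy
    rcases List.mem_append.mp hy with hy | hy
    · have hi' : i < xs.length := by
        by_contra hi'
        rw [List.drop_eq_nil_of_le (by omega)] at hy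
        cases hy
      have : ¬ (h = q.length ∨ xs.getD i 0 ≤ q.getD h 0) := fun hc => htn ⟨hi', hc⟩
      push_neg at this
      have hhead : (xs.drop i).getD 0 0 = xs.getD i 0 := by simp [getD_drop]
      refine le_trans (le_of_lt this.2) ?_
      rw [← hhead]
      exact sorted_head_min _ (pairwise_drop_le xs i hxs)
        (by intro hnil; rw [hnil] at hy; cases hy) y hy
    · have hhead : (q.drop h).getD 0 0 = q.getD h 0 := by simp [getD_drop]
      rw [← hhead]
      exact sorted_head_min _ hq (by rw [hScons]; simp) y hy

-- the queue invariant: the last queued mix is at most x + 2*y for any two distinct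
-- remaining occurrences x, y drawn from the live elements other than itself
def Hq (xs q : List Int) (i h : Nat) : Prop :=
  q.drop h ≠ [] →
  ∀ p r, p < (xs.drop i ++ (q.drop h).dropLast).length →
    r < (xs.drop i ++ (q.drop h).dropLast).length → p ≠ r →
    (q.drop h).getLastD 0 ≤
      (xs.drop i ++ (q.drop h).dropLast).getD p 0
        + 2 * (xs.drop i ++ (q.drop h).dropLast).getD r 0

-- after popping a then b (the two minima) and appending mix = a + 2*b at indices
-- (i2, h2), every invariant of the loop is re-established
theorem afterStep (xs q : List Int) (h i2 h2 : Nat) (a b : Int)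
    (hh2l : h ≤ h2) (hh2 : h2 ≤ q.length)
    (hq : (q.drop h).Pairwise (· ≤ ·))
    (hmin2 : ∀ y ∈ xs.drop i2 ++ q.drop h2, b ≤ y)
    (hab : a ≤ b)
    (hm : q.drop h2 ≠ [] → (q.drop h).getLastD 0 ≤ a + 2 * b) :
    h2 ≤ (q ++ [a + 2 * b]).length ∧
    xs.drop i2 ++ (q ++ [a + 2 * b]).drop h2 = (xs.drop i2 ++ q.drop h2) ++ [a + 2 * b] ∧
    ((q ++ [a + 2 * b]).drop h2).Pairwise (· ≤ ·) ∧
    Hq xs (q ++ [a + 2 * b]) i2 h2 := by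
  have hdq : (q ++ [a + 2 * b]).drop h2 = q.drop h2 ++ [a + 2 * b] :=
    List.drop_append_of_le_length hh2
  refine ⟨by simp; omega, by rw [hdq, List.append_assoc], ?_, ?_⟩
  · -- sortedness of the new queue suffix
    rw [hdq]
    rw [List.pairwise_append]
    refine ⟨?_, by simp, ?_⟩
    · have : q.drop h2 = (q.drop h).drop (h2 - h) := by
        rw [List.drop_drop]
        congr 1
        omega
      rw [this]
      exact pairwise_drop_le _ _ hq
    · intro y hy z hz
      rw [List.mem_singleton] at hz
      subst hz
      have hne2 : q.drop h2 ≠ [] := by intro hnil; rw [hnil] at hy; cases hy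
      have hy' : y ∈ q.drop h := by
        have : q.drop h2 = (q.drop h).drop (h2 - h) := by
          rw [List.drop_drop]; congr 1; omega
        rw [this] at hy
        exact List.mem_of_mem_drop hy
      exact le_trans (sorted_le_getLastD _ hq y hy') (hm hne2)
  · -- Hq for the new last element a + 2*b
    intro _ p r hp hr hpr
    have hdl : ((q ++ [a + 2 * b]).drop h2).dropLast = q.drop h2 := by
      rw [hdq, List.dropLast_concat]
    have hlast : ((q ++ [a + 2 * b]).drop h2).getLastD 0 = a + 2 * b := by
      rw [hdq, List.getLastD_concat]
    rw [hdl] at hp hr ⊢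
    rw [hlast]
    have h1 : b ≤ (xs.drop i2 ++ q.drop h2).getD p 0 :=
      hmin2 _ (getD_mem_self _ _ hp)
    have h2' : b ≤ (xs.drop i2 ++ q.drop h2).getD r 0 :=
      hmin2 _ (getD_mem_self _ _ hr)
    omega

-- value of L = xs.drop i ++ (q.drop h).dropLast at a position inside the q part
theorem L_getD_q (xs q : List Int) (i h k : Nat) (hk : k < (q.drop h).length - 1) :
    (xs.drop i ++ (q.drop h).dropLast).getD ((xs.drop i).length + k) 0 = q.getD (h + k) 0 := by
  rw [getD_append_r, getD_dropLast2 _ _ hk, getD_drop]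

theorem L_getD_x (xs q : List Int) (i h k : Nat) (hk : k < (xs.drop i).length) :
    (xs.drop i ++ (q.drop h).dropLast).getD k 0 = xs.getD (i + k) 0 := by
  rw [getD_append_l _ _ _ hk, getD_drop]

-- ---- the main loop correspondence ----

theorem loop2_eq : ∀ (fuel : Nat) (heap xs q : List Int) (i h : Nat) (K answer : Int),
    heap.length ≤ fuel → i ≤ xs.length → h ≤ q.length →
    PartialHeap heap 0 → heap.Perm (xs.drop i ++ q.drop h) →
    xs.Pairwise (· ≤ ·) → (q.drop h).Pairwise (· ≤ ·) →
    Hq xs q i h →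
    (if scanOkA heap K then answer else loopA fuel heap K answer)
      = loopB (fuel + 1) xs q i h K answer := by
  intro fuel
  induction fuel with
  | zero =>
    intro heap xs q i h K answer hlen hi hh hp hperm hxs hq hH
    have hnil : heap = [] := List.length_eq_zero_iff.mp (by omega)
    subst hnil
    have hlive : xs.drop i ++ q.drop h = [] := (List.Perm.nil_eq hperm).symm
    have hn0 : (xs.length - i) + (q.length - h) = 0 := by
      have := congrArg List.length hlive
      simp [List.length_drop] at this
      omega
    rw [loopB, if_pos hn0]
    simp [scanOkA]
  | succ n ih =>
    intro heap xs q i h K answer hlen hi hh hp hperm hxs hq hH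
    have hnlen : (xs.length - i) + (q.length - h) = heap.length := by
      have := hperm.length_eq
      simp [List.length_drop] at this
      omega
    rw [loopB]
    by_cases hn0 : (xs.length - i) + (q.length - h) = 0
    · rw [if_pos hn0]
      have hnil : heap = [] := List.length_eq_zero_iff.mp (by omega)
      subst hnil
      simp [scanOkA]
    · rw [if_neg hn0]
      have hlivene : xs.drop i ++ q.drop h ≠ [] := by
        intro hnil
        have := congrArg List.length hnil
        simp [List.length_drop] at this
        omega
      -- the popped value a = B's cur, the minimum of the live elements
      by_cases ht1 : takeXs xs q i h = true
      all_goals simp only [ht1, if_true, if_false, Bool.false_eq_true]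
      -- TRUE case: a = xs[i]
      case pos =>
        obtain ⟨hi1, heq1, hmin1⟩ := popOne_true xs q i h hxs hq ht1
        have hamem : xs.getD i 0 ∈ xs.drop i ++ q.drop h := by rw [heq1]; simp
        have hscan : scanOkA heap K = true ↔ K ≤ xs.getD i 0 := by
          rw [scanOkA_iff]
          constructor
          · intro hall
            have := hall _ (hperm.mem_iff.mpr hamem)
            omega
          · intro hK x hx
            have := hmin1 x (hperm.mem_iff.mp hx)
            omega
        by_cases hK : K ≤ xs.getD i 0
        · rw [if_pos hK, if_pos (hscan.mpr hK)]
        · rw [if_neg hK]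
          have hok : scanOkA heap K = false := by
            rw [← Bool.not_eq_true, hscan]; omega
          rw [hok]
          simp only [Bool.false_eq_true, if_false]
          rw [loopA]
          by_cases h2 : 1 < heap.length
          · rw [if_pos h2, if_neg (by omega : ¬ (xs.length - i) + (q.length - h) < 2)]
            -- A pops first = xs[i]
            have hne : heap ≠ [] := by intro hx; rw [hx] at hnlen; simp at hnlen; omega
            have hfst : (heappop heap).1 = xs.getD i 0 := by
              rw [heappop_fst heap hne]
              exact heap_top_eq_min heap _ hperm hp _ hamem hmin1
            have hperm1 : (heappop heap).2.Perm (xs.drop (i + 1) ++ q.drop h) := by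
              have hstep := (heappop_perm heap hne).symm.trans hperm
              rw [hfst, heq1] at hstep
              exact hstep.cons_inv
            have hp1 : PartialHeap (heappop heap).2 0 := heappop_isHeap heap hp
            have hne1 : (heappop heap).2 ≠ [] := by
              have := length_heappop heap
              intro hnil; rw [hnil] at this; simp at this; omega
            have hq1 : (q.drop h).Pairwise (· ≤ ·) := hq
            by_cases ht2 : takeXs xs q (i + 1) h = true
            all_goals simp only [ht2, if_true, if_false, Bool.false_eq_true]
            -- a = xs[i], b = xs[i+1]
            case pos =>
              obtain ⟨hi2, heq2, hmin2⟩ := popOne_true xs q (i + 1) h hxs hq1 ht2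
              have hb : xs.getD (i + 1) 0 ∈ xs.drop (i + 1) ++ q.drop h := by rw [heq2]; simp
              have hsnd : (heappop (heappop heap).2).1 = xs.getD (i + 1) 0 := by
                rw [heappop_fst _ hne1]
                exact heap_top_eq_min _ _ hperm1 hp1 _ hb hmin2
              have hperm2 : (heappop (heappop heap).2).2.Perm (xs.drop (i + 2) ++ q.drop h) := by
                have hstep := (heappop_perm _ hne1).symm.trans hperm1
                rw [hsnd, heq2] at hstep
                have : xs.drop (i + 1 + 1) = xs.drop (i + 2) := by norm_num
                rw [this] at hstep
                exact hstep.cons_inv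
              have hmin2' : ∀ y ∈ xs.drop (i + 2) ++ q.drop h, xs.getD (i + 1) 0 ≤ y := by
                intro y hy
                refine hmin2 y ?_
                rw [heq2]
                have : xs.drop (i + 1 + 1) = xs.drop (i + 2) := by norm_num
                rw [this]
                exact List.mem_cons_of_mem _ hy
              have hab : xs.getD i 0 ≤ xs.getD (i + 1) 0 := hmin1 _ (by rw [heq1]; right; exact hb)
              have hmge : q.drop h ≠ [] → (q.drop h).getLastD 0 ≤ xs.getD i 0 + 2 * xs.getD (i + 1) 0 := by
                intro hqne
                have hw2 : 2 ≤ (xs.drop i).length := by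
                  rw [List.length_drop]
                  omega
                have hL0 := L_getD_x xs q i h 0 (by omega)
                have hL1 := L_getD_x xs q i h 1 (by omega)
                have hLlen : 1 < (xs.drop i ++ (q.drop h).dropLast).length := by
                  rw [List.length_append]
                  omega
                have := hH hqne 0 1 (by omega) hLlen (by omega)
                rw [hL0, hL1] at this
                simpa using this
              obtain ⟨hh2, hdq, hqs2, hH2⟩ := afterStep xs q h (i + 2) h
                (xs.getD i 0) (xs.getD (i + 1) 0) le_rfl hh hq hmin2' hab hmge
              have hmix : (heappop heap).1 + (heappop (heappop heap).2).1 * 2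
                  = xs.getD i 0 + 2 * xs.getD (i + 1) 0 := by rw [hfst, hsnd]; ring
              have hperm3 : (heappush (heappop (heappop heap).2).2
                  ((heappop heap).1 + (heappop (heappop heap).2).1 * 2)).Perm
                  (xs.drop (i + 2) ++ (q ++ [xs.getD i 0 + 2 * xs.getD (i + 1) 0]).drop h) := by
                rw [hdq, hmix]
                exact (heappush_perm _ _).trans (hperm2.append_right _)
              have hl3 : (heappush (heappop (heappop heap).2).2
                  ((heappop heap).1 + (heappop (heappop heap).2).1 * 2)).length ≤ n := by
                rw [length_heappush, length_heappop, length_heappop]; omega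
              exact ih _ xs _ (i + 2) h K (answer + 1) hl3 (by omega) hh2
                (heappush_isHeap _ _ (heappop_isHeap _ hp1)) hperm3 hxs hqs2 hH2
            -- a = xs[i], b = q[h]
            case neg =>
              rw [Bool.not_eq_true] at ht2
              obtain ⟨hhl, hpq2, hmin2⟩ := popOne_false xs q (i + 1) h hh hxs hq1
                (by
                  have hlp := length_heappop heap
                  have hx := hperm1.length_eq
                  intro hnil
                  rw [hnil] at hx
                  simp only [List.length_nil] at hx
                  omega) ht2
              have hb : q.getD h 0 ∈ xs.drop (i + 1) ++ q.drop h :=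
                hpq2.mem_iff.mpr (by simp)
              have hsnd : (heappop (heappop heap).2).1 = q.getD h 0 := by
                rw [heappop_fst _ hne1]
                exact heap_top_eq_min _ _ hperm1 hp1 _ hb hmin2
              have hperm2 : (heappop (heappop heap).2).2.Perm (xs.drop (i + 1) ++ q.drop (h + 1)) := by
                have hstep := (heappop_perm _ hne1).symm.trans (hperm1.trans hpq2)
                rw [hsnd] at hstep
                exact hstep.cons_inv
              have hmin2' : ∀ y ∈ xs.drop (i + 1) ++ q.drop (h + 1), q.getD h 0 ≤ y := by
                intro y hy
                exact hmin2 y (hpq2.mem_iff.mpr (List.mem_cons_of_mem _ hy))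
              have hab : xs.getD i 0 ≤ q.getD h 0 := hmin1 _ (by rw [heq1]; right; exact hb)
              have hmge : q.drop (h + 1) ≠ [] → (q.drop h).getLastD 0 ≤ xs.getD i 0 + 2 * q.getD h 0 := by
                intro hqne2
                have hS2 : 2 ≤ (q.drop h).length := by
                  have h1 : (q.drop (h + 1)).length ≠ 0 := by
                    intro hx; exact hqne2 (List.length_eq_zero_iff.mp hx)
                  rw [List.length_drop] at *
                  omega
                have hw1 : 1 ≤ (xs.drop i).length := by rw [List.length_drop]; omega
                have hqne : q.drop h ≠ [] := by
                  intro hnil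
                  have := congrArg List.length hnil
                  simp [List.length_drop] at this
                  omega
                have hL0 := L_getD_x xs q i h 0 (by omega)
                have hLw := L_getD_q xs q i h 0 (by omega)
                have hLlen : (xs.drop i).length + 0 < (xs.drop i ++ (q.drop h).dropLast).length := by
                  rw [List.length_append, List.length_dropLast]
                  omega
                have := hH hqne 0 ((xs.drop i).length + 0) (by omega) hLlen (by omega)
                rw [hL0, hLw] at this
                simpa using this
              obtain ⟨hh2, hdq, hqs2, hH2⟩ := afterStep xs q h (i + 1) (h + 1)
                (xs.getD i 0) (q.getD h 0) (by omega) (by omega) hq hmin2' hab hmge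
              have hmix : (heappop heap).1 + (heappop (heappop heap).2).1 * 2
                  = xs.getD i 0 + 2 * q.getD h 0 := by rw [hfst, hsnd]; ring
              have hperm3 : (heappush (heappop (heappop heap).2).2
                  ((heappop heap).1 + (heappop (heappop heap).2).1 * 2)).Perm
                  (xs.drop (i + 1) ++ (q ++ [xs.getD i 0 + 2 * q.getD h 0]).drop (h + 1)) := by
                rw [hdq, hmix]
                exact (heappush_perm _ _).trans (hperm2.append_right _)
              have hl3 : (heappush (heappop (heappop heap).2).2
                  ((heappop heap).1 + (heappop (heappop heap).2).1 * 2)).length ≤ n := by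
                rw [length_heappush, length_heappop, length_heappop]; omega
              exact ih _ xs _ (i + 1) (h + 1) K (answer + 1) hl3 (by omega) hh2
                (heappush_isHeap _ _ (heappop_isHeap _ hp1)) hperm3 hxs hqs2 hH2
          · rw [if_neg h2, if_pos (by omega : (xs.length - i) + (q.length - h) < 2)]
      -- FALSE case: a = q[h]
      case neg =>
        rw [Bool.not_eq_true] at ht1
        obtain ⟨hhl, hpq1, hmin1⟩ := popOne_false xs q i h hh hxs hq hlivene ht1
        have hamem : q.getD h 0 ∈ xs.drop i ++ q.drop h := hpq1.mem_iff.mpr (by simp)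
        have hscan : scanOkA heap K = true ↔ K ≤ q.getD h 0 := by
          rw [scanOkA_iff]
          constructor
          · intro hall
            have := hall _ (hperm.mem_iff.mpr hamem)
            omega
          · intro hK x hx
            have := hmin1 x (hperm.mem_iff.mp hx)
            omega
        by_cases hK : K ≤ q.getD h 0
        · rw [if_pos hK, if_pos (hscan.mpr hK)]
        · rw [if_neg hK]
          have hok : scanOkA heap K = false := by
            rw [← Bool.not_eq_true, hscan]; omega
          rw [hok]
          simp only [Bool.false_eq_true, if_false]
          rw [loopA]
          by_cases h2 : 1 < heap.length
          · rw [if_pos h2, if_neg (by omega : ¬ (xs.length - i) + (q.length - h) < 2)]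
            have hne : heap ≠ [] := by intro hx; rw [hx] at hnlen; simp at hnlen; omega
            have hfst : (heappop heap).1 = q.getD h 0 := by
              rw [heappop_fst heap hne]
              exact heap_top_eq_min heap _ hperm hp _ hamem hmin1
            have hperm1 : (heappop heap).2.Perm (xs.drop i ++ q.drop (h + 1)) := by
              have hstep := (heappop_perm heap hne).symm.trans (hperm.trans hpq1)
              rw [hfst] at hstep
              exact hstep.cons_inv
            have hp1 : PartialHeap (heappop heap).2 0 := heappop_isHeap heap hp
            have hne1 : (heappop heap).2 ≠ [] := by
              have := length_heappop heap
              intro hnil; rw [hnil] at this; simp at this; omega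
            have hq1 : (q.drop (h + 1)).Pairwise (· ≤ ·) := by
              have : q.drop (h + 1) = (q.drop h).drop 1 := by rw [List.drop_drop]
              rw [this]
              exact pairwise_drop_le _ _ hq
            by_cases ht2 : takeXs xs q i (h + 1) = true
            all_goals simp only [ht2, if_true, if_false, Bool.false_eq_true]
            -- a = q[h], b = xs[i]
            case pos =>
              obtain ⟨hi2, heq2, hmin2⟩ := popOne_true xs q i (h + 1) hxs hq1 ht2
              have hb : xs.getD i 0 ∈ xs.drop i ++ q.drop (h + 1) := by rw [heq2]; simp
              have hsnd : (heappop (heappop heap).2).1 = xs.getD i 0 := by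
                rw [heappop_fst _ hne1]
                exact heap_top_eq_min _ _ hperm1 hp1 _ hb hmin2
              have hperm2 : (heappop (heappop heap).2).2.Perm (xs.drop (i + 1) ++ q.drop (h + 1)) := by
                have hstep := (heappop_perm _ hne1).symm.trans hperm1
                rw [hsnd, heq2] at hstep
                exact hstep.cons_inv
              have hmin2' : ∀ y ∈ xs.drop (i + 1) ++ q.drop (h + 1), xs.getD i 0 ≤ y := by
                intro y hy
                refine hmin2 y ?_
                rw [heq2]
                exact List.mem_cons_of_mem _ hy
              have hab : q.getD h 0 ≤ xs.getD i 0 :=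
                hmin1 _ (hpq1.mem_iff.mpr (List.mem_cons_of_mem _ hb))
              have hmge : q.drop (h + 1) ≠ [] → (q.drop h).getLastD 0 ≤ q.getD h 0 + 2 * xs.getD i 0 := by
                intro hqne2
                have hS2 : 2 ≤ (q.drop h).length := by
                  have h1 : (q.drop (h + 1)).length ≠ 0 := by
                    intro hx; exact hqne2 (List.length_eq_zero_iff.mp hx)
                  rw [List.length_drop] at *
                  omega
                have hw1 : 1 ≤ (xs.drop i).length := by rw [List.length_drop]; omega
                have hqne : q.drop h ≠ [] := by
                  intro hnil
                  have := congrArg List.length hnil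
                  simp [List.length_drop] at this
                  omega
                have hL0 := L_getD_x xs q i h 0 (by omega)
                have hLw := L_getD_q xs q i h 0 (by omega)
                have hLlen : (xs.drop i).length + 0 < (xs.drop i ++ (q.drop h).dropLast).length := by
                  rw [List.length_append, List.length_dropLast]
                  omega
                have := hH hqne ((xs.drop i).length + 0) 0 hLlen (by omega) (by omega)
                rw [hL0, hLw] at this
                simpa using this
              obtain ⟨hh2, hdq, hqs2, hH2⟩ := afterStep xs q h (i + 1) (h + 1)
                (q.getD h 0) (xs.getD i 0) (by omega) (by omega) hq hmin2' hab hmge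
              have hmix : (heappop heap).1 + (heappop (heappop heap).2).1 * 2
                  = q.getD h 0 + 2 * xs.getD i 0 := by rw [hfst, hsnd]; ring
              have hperm3 : (heappush (heappop (heappop heap).2).2
                  ((heappop heap).1 + (heappop (heappop heap).2).1 * 2)).Perm
                  (xs.drop (i + 1) ++ (q ++ [q.getD h 0 + 2 * xs.getD i 0]).drop (h + 1)) := by
                rw [hdq, hmix]
                exact (heappush_perm _ _).trans (hperm2.append_right _)
              have hl3 : (heappush (heappop (heappop heap).2).2
                  ((heappop heap).1 + (heappop (heappop heap).2).1 * 2)).length ≤ n := by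
                rw [length_heappush, length_heappop, length_heappop]; omega
              exact ih _ xs _ (i + 1) (h + 1) K (answer + 1) hl3 (by omega) hh2
                (heappush_isHeap _ _ (heappop_isHeap _ hp1)) hperm3 hxs hqs2 hH2
            -- a = q[h], b = q[h+1]
            case neg =>
              rw [Bool.not_eq_true] at ht2
              obtain ⟨hhl2, hpq2, hmin2⟩ := popOne_false xs q i (h + 1) (by omega) hxs hq1
                (by
                  have hlp := length_heappop heap
                  have hx := hperm1.length_eq
                  intro hnil
                  rw [hnil] at hx
                  simp only [List.length_nil] at hx
                  omega) ht2
              have hb : q.getD (h + 1) 0 ∈ xs.drop i ++ q.drop (h + 1) :=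
                hpq2.mem_iff.mpr (by simp)
              have hsnd : (heappop (heappop heap).2).1 = q.getD (h + 1) 0 := by
                rw [heappop_fst _ hne1]
                exact heap_top_eq_min _ _ hperm1 hp1 _ hb hmin2
              have hperm2 : (heappop (heappop heap).2).2.Perm (xs.drop i ++ q.drop (h + 2)) := by
                have hstep := (heappop_perm _ hne1).symm.trans (hperm1.trans hpq2)
                rw [hsnd] at hstep
                have : q.drop (h + 1 + 1) = q.drop (h + 2) := by norm_num
                rw [this] at hstep
                exact hstep.cons_inv
              have hmin2' : ∀ y ∈ xs.drop i ++ q.drop (h + 2), q.getD (h + 1) 0 ≤ y := by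
                intro y hy
                refine hmin2 y (hpq2.mem_iff.mpr ?_)
                have : q.drop (h + 1 + 1) = q.drop (h + 2) := by norm_num
                rw [this]
                exact List.mem_cons_of_mem _ hy
              have hab : q.getD h 0 ≤ q.getD (h + 1) 0 :=
                hmin1 _ (hpq1.mem_iff.mpr (List.mem_cons_of_mem _ hb))
              have hmge : q.drop (h + 2) ≠ [] → (q.drop h).getLastD 0 ≤ q.getD h 0 + 2 * q.getD (h + 1) 0 := by
                intro hqne3
                have hS3 : 3 ≤ (q.drop h).length := by
                  have h1 : (q.drop (h + 2)).length ≠ 0 := by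
                    intro hx; exact hqne3 (List.length_eq_zero_iff.mp hx)
                  rw [List.length_drop] at *
                  omega
                have hqne : q.drop h ≠ [] := by
                  intro hnil
                  have := congrArg List.length hnil
                  simp [List.length_drop] at this
                  omega
                have hLw0 := L_getD_q xs q i h 0 (by omega)
                have hLw1 := L_getD_q xs q i h 1 (by omega)
                have hLlen : (xs.drop i).length + 1 < (xs.drop i ++ (q.drop h).dropLast).length := by
                  rw [List.length_append, List.length_dropLast]
                  omega
                have := hH hqne ((xs.drop i).length + 0) ((xs.drop i).length + 1)
                  (by omega) hLlen (by omega)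
                rw [hLw0, hLw1] at this
                simpa using this
              obtain ⟨hh2, hdq, hqs2, hH2⟩ := afterStep xs q h i (h + 2)
                (q.getD h 0) (q.getD (h + 1) 0) (by omega) (by omega) hq hmin2' hab hmge
              have hmix : (heappop heap).1 + (heappop (heappop heap).2).1 * 2
                  = q.getD h 0 + 2 * q.getD (h + 1) 0 := by rw [hfst, hsnd]; ring
              have hperm3 : (heappush (heappop (heappop heap).2).2
                  ((heappop heap).1 + (heappop (heappop heap).2).1 * 2)).Perm
                  (xs.drop i ++ (q ++ [q.getD h 0 + 2 * q.getD (h + 1) 0]).drop (h + 2)) := by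
                rw [hdq, hmix]
                exact (heappush_perm _ _).trans (hperm2.append_right _)
              have hl3 : (heappush (heappop (heappop heap).2).2
                  ((heappop heap).1 + (heappop (heappop heap).2).1 * 2)).length ≤ n := by
                rw [length_heappush, length_heappop, length_heappop]; omega
              exact ih _ xs _ i (h + 2) K (answer + 1) hl3 (by omega) hh2
                (heappush_isHeap _ _ (heappop_isHeap _ hp1)) hperm3 hxs hqs2 hH2
          · rw [if_neg h2, if_pos (by omega : (xs.length - i) + (q.length - h) < 2)]

-- ===== VERDICT (by name: the statement is the Claim_ definition above) =====
theorem solution_spec : Claim_equal_solution := by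
  intro scoville K _
  unfold Spec_solution solution solution_alt
  have hperm0 : (pyHeapify scoville).Perm (PySem.List.sorted scoville (fun x => x) false) :=
    (pyHeapify_perm scoville).trans (PySem.List.sorted_perm _ _ _).symm
  have hlen : (pyHeapify scoville).length = (PySem.List.sorted scoville (fun x => x) false).length :=
    hperm0.length_eq
  have hs : (PySem.List.sorted scoville (fun x => x) false).Pairwise (· ≤ ·) := by
    simpa using PySem.List.sorted_pairwise (xs := scoville) (key := fun x => x)
  show (if scanOkA (pyHeapify scoville) K = true then (0 : Int)
      else loopA (pyHeapify scoville).length (pyHeapify scoville) K 0)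
    = loopB ((PySem.List.sorted scoville (fun x => x) false).length + 1)
        (PySem.List.sorted scoville (fun x => x) false) [] 0 0 K 0
  rw [hlen]
  refine loop2_eq _ _ _ [] 0 0 K 0 (by omega) (by omega) (by omega)
    (pyHeapify_isHeap scoville) ?_ hs ?_ ?_
  · simpa using hperm0
  · simp
  · intro hne
    simp at hne
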